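-- pv_equiv track=rewrite | github.com/nodirsafarov/adenum | adenum_lib/parsers.py | extract_asrep_hashes
-- ===== SOURCE A (Python) =====
-- def extract_asrep_hashes(text: str) -> list[str]:
--     out: list[str] = []
--     buf: list[str] = []
--     for line in text.splitlines():
--         if line.startswith("$krb5asrep$"):
--             if buf:
--                 out.append("".join(buf))
--             buf = [line]
--         elif buf and line.strip() and not line.startswith("[") and ":" not in line[:6]:
--             buf.append(line.strip())
--         else:
--             if buf:
--                 out.append("".join(buf))
--                 buf = []
--     if buf:
--         out.append("".join(buf))
--     return [hash_str for hash_str in out if hash_str.startswith("$krb5asrep$")]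
-- ===== SOURCE B (Python) =====
-- def extract_asrep_hashes(text: str) -> list[str]:
--     HDR = "$krb5asrep$"
--     lines = text.splitlines()
--     out: list[str] = []
--     i, n = 0, len(lines)
--     while i < n:
--         if not lines[i].startswith(HDR):
--             i += 1
--             continue
--         block = lines[i]
--         i += 1
--         while i < n:
--             line = lines[i]
--             if line.startswith(HDR):
--                 break
--             if not line.strip() or line.startswith("[") or ":" in line[:6]:
--                 i += 1  # terminating line: consumed by the outer scan as a non-header
--                 break
--             block += line.strip()
--             i += 1
--         out.append(block)
--     return out
-- ===== Notes on version B (the rewrite author's own statement) =====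
-- stated objective: alternative
-- what changed: Replaced A's single fold over an (out, buf) accumulator state with a trailing startswith-filter pass by a two-level scan: an outer loop that skips to each krb5asrep header line and an inner loop that appends stripped continuation lines, emitting each block directly with no final filter.
import Mathlib
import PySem

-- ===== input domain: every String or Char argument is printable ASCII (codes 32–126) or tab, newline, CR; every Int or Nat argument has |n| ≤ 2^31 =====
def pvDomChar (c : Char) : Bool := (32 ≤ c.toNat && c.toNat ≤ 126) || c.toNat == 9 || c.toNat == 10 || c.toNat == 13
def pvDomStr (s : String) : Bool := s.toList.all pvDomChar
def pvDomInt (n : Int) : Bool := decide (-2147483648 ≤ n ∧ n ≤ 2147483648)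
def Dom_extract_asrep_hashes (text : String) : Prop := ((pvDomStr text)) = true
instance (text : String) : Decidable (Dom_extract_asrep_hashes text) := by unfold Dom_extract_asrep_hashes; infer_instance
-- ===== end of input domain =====

-- B replaces A's single fold over an (out, buf) state plus a trailing filter pass by a
-- two-level scan (outer loop finds header lines, inner loop collects continuations) that
-- emits blocks directly; objective: alternative decomposition, same return value.

-- ===== PORT A =====
-- one step of A's for-loop over the state (out, buf)
def pvAStep (st : List String × List String) (line : String) : List String × List String :=
  match st with
  | (out, buf) =>
    if PySem.Str.startswith line "$krb5asrep$" then
      ((if buf.isEmpty then out else out ++ [PySem.Str.join "" buf]), [line])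
    else if (!buf.isEmpty) && !(PySem.Str.strip line == "") && !(PySem.Str.startswith line "[")
            && !(PySem.Str.isIn ":" (PySem.Str.slice line none (some 6))) then
      (out, buf ++ [PySem.Str.strip line])
    else
      (if buf.isEmpty then (out, buf) else (out ++ [PySem.Str.join "" buf], ([] : List String)))

def extract_asrep_hashes (text : String) : List String :=
  let r := (PySem.Str.splitlines text).foldl pvAStep ([], [])
  let out := if r.2.isEmpty then r.1 else r.1 ++ [PySem.Str.join "" r.2]
  out.filter (fun h => PySem.Str.startswith h "$krb5asrep$")

-- ===== PORT B =====
-- continuation test of B's inner loop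
def pvCont (line : String) : Bool :=
  !(PySem.Str.strip line == "") && !(PySem.Str.startswith line "[")
    && !(PySem.Str.isIn ":" (PySem.Str.slice line none (some 6)))

mutual
-- outer while-loop of B: skip lines until a header line starts a block
def pvBOuter : List String → List String
  | [] => []
  | l :: rest =>
    if PySem.Str.startswith l "$krb5asrep$" then pvBInner rest l else pvBOuter rest
-- inner while-loop of B: extend the current block with stripped continuation lines;
-- a header line ends the block and immediately starts the next one (Source B's outer loop
-- re-reads the unconsumed header; that outer re-read is inlined here), any other
-- terminating line is consumed
def pvBInner : List String → String → List String
  | [], block => [block]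
  | l :: rest, block =>
    if PySem.Str.startswith l "$krb5asrep$" then block :: pvBInner rest l
    else if pvCont l then pvBInner rest (block ++ PySem.Str.strip l)
    else block :: pvBOuter rest
end

def extract_asrep_hashes_alt (text : String) : List String :=
  pvBOuter (PySem.Str.splitlines text)

-- ===== PRECONDITION & SPEC =====
def Spec_extract_asrep_hashes (text : String) (out : List String) : Prop := out = extract_asrep_hashes_alt text
instance (text : String) (out : List String) : Decidable (Spec_extract_asrep_hashes text out) := by unfold Spec_extract_asrep_hashes; infer_instance

-- ===== CLAIM (what is proved, stated in full; the proofs are below) =====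
def Claim_equal_extract_asrep_hashes : Prop := ∀ (text : String), Dom_extract_asrep_hashes text → Spec_extract_asrep_hashes text (extract_asrep_hashes text)

-- ===== LEMMAS AND PROOFS =====

-- A's result as a function of the remaining lines and the loop state
def pvAFin (ls : List String) (out buf : List String) : List String :=
  let r := ls.foldl pvAStep (out, buf)
  (if r.2.isEmpty then r.1 else r.1 ++ [PySem.Str.join "" r.2]).filter
    (fun h => PySem.Str.startswith h "$krb5asrep$")

theorem pvAFin_spec (text : String) : extract_asrep_hashes text = pvAFin (PySem.Str.splitlines text) [] [] := rfl

theorem pvJoin_empty_append (ps : List (List Char)) (s : List Char) :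
    PySem.Chars.join [] (ps ++ [s]) = PySem.Chars.join [] ps ++ s := by
  induction ps with
  | nil => simp [PySem.Chars.join, List.intercalate]
  | cons p ps ih =>
    cases ps with
    | nil => simp_all [PySem.Chars.join, List.intercalate]
    | cons q qs => simp_all [PySem.Chars.join, List.intercalate, List.intersperse]

theorem pvJoin_singleton (s : String) : PySem.Str.join "" [s] = s := by
  apply String.toList_inj.mp
  rw [PySem.Str.toList_join]
  simpa using pvJoin_empty_append [] s.toList

theorem pvJoin_append (buf : List String) (s : String) :
    PySem.Str.join "" (buf ++ [s]) = PySem.Str.join "" buf ++ s := by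
  apply String.toList_inj.mp
  rw [String.toList_append, PySem.Str.toList_join, PySem.Str.toList_join]
  simpa using pvJoin_empty_append (buf.map String.toList) s.toList

theorem pvHdr_append {s : String} (t : String)
    (h : PySem.Str.startswith s "$krb5asrep$" = true) :
    PySem.Str.startswith (s ++ t) "$krb5asrep$" = true := by
  rw [PySem.Str.startswith_eq, PySem.Chars.startswith_iff] at *
  rw [String.toList_append]
  exact h.trans (List.prefix_append _ _)

-- A's elif condition is buffer-nonemptiness together with B's continuation test
theorem pvCond_eq (buf : List String) (l : String) :
    ((!buf.isEmpty) && !(PySem.Str.strip l == "") && !(PySem.Str.startswith l "[")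
      && !(PySem.Str.isIn ":" (PySem.Str.slice l none (some 6))))
      = ((!buf.isEmpty) && pvCont l) := by
  unfold pvCont
  cases buf.isEmpty <;> cases PySem.Str.strip l == "" <;>
    cases PySem.Str.startswith l "[" <;>
    cases PySem.Str.isIn ":" (PySem.Str.slice l none (some 6)) <;> rfl

theorem pvAStep_hdr (out buf : List String) (l : String)
    (hl : PySem.Str.startswith l "$krb5asrep$" = true) :
    pvAStep (out, buf) l = ((if buf.isEmpty then out else out ++ [PySem.Str.join "" buf]), [l]) := by
  simp only [pvAStep]; rw [if_pos hl]

theorem pvAStep_cont (out buf : List String) (l : String)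
    (hl : PySem.Str.startswith l "$krb5asrep$" = false)
    (hbe : buf.isEmpty = false) (hc : pvCont l = true) :
    pvAStep (out, buf) l = (out, buf ++ [PySem.Str.strip l]) := by
  simp only [pvAStep]
  rw [pvCond_eq buf l, hl, hbe, hc]
  simp

theorem pvAStep_term (out buf : List String) (l : String)
    (hl : PySem.Str.startswith l "$krb5asrep$" = false) (hc : pvCont l = false) :
    pvAStep (out, buf) l = (if buf.isEmpty then (out, buf) else (out ++ [PySem.Str.join "" buf], [])) := by
  simp only [pvAStep]
  rw [pvCond_eq buf l, hl, hc]
  simp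

-- the out-component of A's loop only grows by appending
theorem pvAStep_out (out buf : List String) (l : String) :
    pvAStep (out, buf) l = (out ++ (pvAStep ([], buf) l).1, (pvAStep ([], buf) l).2) := by
  cases hl : PySem.Str.startswith l "$krb5asrep$"
  · cases hc : pvCont l
    · rw [pvAStep_term out buf l hl hc, pvAStep_term [] buf l hl hc]
      cases buf <;> simp
    · cases hbe : buf.isEmpty
      · rw [pvAStep_cont out buf l hl hbe hc, pvAStep_cont [] buf l hl hbe hc]
        simp
      · have hb : buf = [] := by cases buf <;> simp_all
        subst hb
        have he : ∀ o : List String, pvAStep (o, []) l = (o, []) := by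
          intro o
          simp only [pvAStep]
          rw [pvCond_eq [] l, hl]
          simp
        rw [he out, he []]
        simp
  · rw [pvAStep_hdr out buf l hl, pvAStep_hdr [] buf l hl]
    cases buf <;> simp

theorem pvAFin_out (ls : List String) : ∀ out buf : List String,
    pvAFin ls out buf
      = out.filter (fun h => PySem.Str.startswith h "$krb5asrep$") ++ pvAFin ls [] buf := by
  induction ls with
  | nil =>
    intro out buf
    unfold pvAFin
    cases buf <;> simp [List.filter_append]
  | cons l ls ih =>
    intro out buf
    unfold pvAFin
    simp only [List.foldl_cons]
    rw [pvAStep_out out buf l]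
    have h1 := ih (out ++ (pvAStep ([], buf) l).1) (pvAStep ([], buf) l).2
    have h2 := ih (pvAStep ([], buf) l).1 (pvAStep ([], buf) l).2
    unfold pvAFin at h1 h2
    simp only at h1 h2
    rw [h1, h2, List.filter_append, List.append_assoc]

-- main invariant: A's loop from an empty buffer is B's outer scan, and from a header-opened
-- buffer buf it is B's inner scan on the joined block
theorem pvMain (ls : List String) :
    (pvAFin ls [] [] = pvBOuter ls)
      ∧ (∀ buf : List String, buf ≠ []
          → PySem.Str.startswith (PySem.Str.join "" buf) "$krb5asrep$" = true
          → pvAFin ls [] buf = pvBInner ls (PySem.Str.join "" buf)) := by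
  induction ls with
  | nil =>
    refine ⟨rfl, ?_⟩
    intro buf hne hh
    have hbe : buf.isEmpty = false := by cases buf <;> simp_all
    unfold pvAFin pvBInner
    simp only [List.foldl_nil, hbe, if_false, Bool.false_eq_true]
    simp only [List.filter_cons, List.filter_nil, hh, if_true, List.nil_append]
  | cons l ls ih =>
    obtain ⟨ih1, ih2⟩ := ih
    constructor
    · show pvAFin (l :: ls) [] [] = pvBOuter (l :: ls)
      unfold pvAFin
      simp only [List.foldl_cons]
      cases hl : PySem.Str.startswith l "$krb5asrep$"
      · have hstep : pvAStep ([], []) l = ([], []) := by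
          cases hc : pvCont l
          · rw [pvAStep_term [] [] l hl hc]; simp
          · have : ((!([] : List String).isEmpty) && !(PySem.Str.strip l == "")
                && !(PySem.Str.startswith l "[")
                && !(PySem.Str.isIn ":" (PySem.Str.slice l none (some 6)))) = false := by
              rw [pvCond_eq]; simp
            simp only [pvAStep, hl, Bool.false_eq_true, if_false, this]
            simp
        rw [hstep]
        have := ih1
        unfold pvAFin at this
        rw [this]
        simp only [pvBOuter, hl, Bool.false_eq_true, if_false]
      · rw [pvAStep_hdr [] [] l hl]
        have hI := ih2 [l] (by simp) (by rw [pvJoin_singleton]; exact hl)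
        unfold pvAFin at hI
        rw [pvJoin_singleton] at hI
        simp only [List.isEmpty_nil, if_true] at *
        rw [hI]
        simp only [pvBOuter, hl, if_true]
    · intro buf hne hh
      have hbe : buf.isEmpty = false := by cases buf <;> simp_all
      show pvAFin (l :: ls) [] buf = pvBInner (l :: ls) (PySem.Str.join "" buf)
      unfold pvAFin
      simp only [List.foldl_cons]
      cases hl : PySem.Str.startswith l "$krb5asrep$"
      · cases hc : pvCont l
        · -- terminating line: emit the block, fall back to the outer scan
          rw [pvAStep_term [] buf l hl hc]
          simp only [hbe, Bool.false_eq_true, if_false, List.nil_append]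
          have hO := pvAFin_out ls [PySem.Str.join "" buf] []
          unfold pvAFin at hO
          simp only at hO
          have ih1' := ih1
          unfold pvAFin at ih1'
          rw [hO, ih1']
          simp only [List.filter_cons, List.filter_nil, hh, if_true]
          simp only [pvBInner, hl, hc, Bool.false_eq_true, if_false, List.singleton_append]
        · -- continuation line: extend the block
          rw [pvAStep_cont [] buf l hl hbe hc]
          have hI := ih2 (buf ++ [PySem.Str.strip l]) (by simp)
            (by rw [pvJoin_append]; exact pvHdr_append _ hh)
          unfold pvAFin at hI
          simp only at hI
          rw [hI, pvJoin_append]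
          simp only [pvBInner, hl, hc, Bool.false_eq_true, if_false, if_true]
      · -- header line: emit the block, start the next one
        rw [pvAStep_hdr [] buf l hl]
        simp only [hbe, Bool.false_eq_true, if_false, List.nil_append]
        have hI := ih2 [l] (by simp) (by rw [pvJoin_singleton]; exact hl)
        have hO := pvAFin_out ls [PySem.Str.join "" buf] [l]
        unfold pvAFin at hI hO
        simp only at hI hO
        rw [pvJoin_singleton] at hI
        rw [hO, hI]
        simp only [List.filter_cons, List.filter_nil, hh, if_true]
        simp only [pvBInner, hl, if_true, List.singleton_append]

-- ===== VERDICT (by name: the statement is the Claim_ definition above) =====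
theorem extract_asrep_hashes_spec : Claim_equal_extract_asrep_hashes := by
  intro text _
  show extract_asrep_hashes text = extract_asrep_hashes_alt text
  rw [pvAFin_spec, extract_asrep_hashes_alt]
  exact (pvMain _).1
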